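-- pv_equiv track=rewrite | github.com/BenazirSh/Master-Thesis-Privacy-Sensitive-Data-Recognition | psi_extractor_main.py | combine_city_country
-- ===== SOURCE A (Python) =====
-- def combine_city_country(locations):
--     combined_locations = []
--     i = 0
--     while i < len(locations):
--         if i < len(locations) - 1:
--             combined_locations.append(f"{locations[i]}, {locations[i + 1]}")
--             i += 2
--         else:
--             combined_locations.append(locations[i])
--             i += 1
--     return combined_locations
-- ===== SOURCE B (Python) =====
-- def combine_city_country(locations):
--     combined = [f"{a}, {b}" for a, b in zip(locations[::2], locations[1::2])]
--     if len(locations) % 2: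
--         combined.append(locations[-1])
--     return combined
-- ===== Notes on version B (the rewrite author's own statement) =====
-- stated objective: idiomatic
-- what changed: Replaces the index-driven while loop (manual i += 2 / i += 1 stepping with an append accumulator) by zipping the even- and odd-strided slices locations[::2] and locations[1::2] in a comprehension, appending the raw last element when the length is odd.
import Mathlib
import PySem

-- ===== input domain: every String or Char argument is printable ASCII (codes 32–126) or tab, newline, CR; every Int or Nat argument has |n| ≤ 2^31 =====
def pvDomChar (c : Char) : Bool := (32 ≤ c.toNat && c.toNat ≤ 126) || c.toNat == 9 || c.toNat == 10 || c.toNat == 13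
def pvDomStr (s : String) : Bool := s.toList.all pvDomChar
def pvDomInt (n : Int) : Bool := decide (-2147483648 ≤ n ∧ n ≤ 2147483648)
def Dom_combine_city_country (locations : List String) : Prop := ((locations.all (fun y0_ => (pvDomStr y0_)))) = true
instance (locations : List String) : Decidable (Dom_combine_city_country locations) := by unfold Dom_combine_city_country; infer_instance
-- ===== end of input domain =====

-- B replaces A's index-driven while loop by zipping the even- and odd-strided slices (idiomatic decomposition; same cost).

-- ===== PORT A =====
-- the while loop: state = (combined_locations, i); appends one or two elements per step
def combineLoop (locations : List String) (acc : List String) (i : Nat) : List String :=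
  if i < locations.length then
    if i < locations.length - 1 then
      combineLoop locations
        (acc ++ [PySem.List.pyGetD locations (i : Int) "" ++ ", " ++ PySem.List.pyGetD locations ((i : Nat) + 1 : Int) ""])
        (i + 2)
    else
      combineLoop locations (acc ++ [PySem.List.pyGetD locations (i : Int) ""]) (i + 1)
  else acc
termination_by locations.length - i

def combine_city_country (locations : List String) : List String :=
  combineLoop locations [] 0

-- ===== PORT B =====
-- locations[::2], locations[1::2]; slice? with step 2 is never none, .getD [] unwraps it
def combine_city_country_alt (locations : List String) : List String :=
  let evens := (PySem.List.slice? locations none none 2).getD []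
  let odds := (PySem.List.slice? locations (some 1) none 2).getD []
  let combined := (evens.zip odds).map (fun p => p.1 ++ ", " ++ p.2)
  -- `if len(locations) % 2:` — truthy iff nonzero; locations[-1] (in range here, Python never raises on this branch)
  if PySem.Int.mod (locations.length : Int) 2 ≠ 0 then
    combined ++ [PySem.List.pyGetD locations (-1) ""]
  else combined

-- ===== PRECONDITION & SPEC =====
def Spec_combine_city_country (locations : List String) (out : List String) : Prop := out = combine_city_country_alt locations
instance (locations : List String) (out : List String) : Decidable (Spec_combine_city_country locations out) := by unfold Spec_combine_city_country; infer_instance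

-- ===== CLAIM (what is proved, stated in full; the proofs are below) =====
def Claim_equal_combine_city_country : Prop := ∀ (locations : List String), Dom_combine_city_country locations → Spec_combine_city_country locations (combine_city_country locations)

-- ===== LEMMAS AND PROOFS =====

-- canonical pairing both programs compute
def pairUp : List String → List String
  | [] => []
  | [x] => [x]
  | x :: y :: r => (x ++ ", " ++ y) :: pairUp r

-- A's loop from index i produces pairUp of the remaining suffix
theorem combineLoop_eq (locations : List String) :
    ∀ acc i, combineLoop locations acc i = acc ++ pairUp (locations.drop i) := by
  intro acc i
  induction acc, i using combineLoop.induct locations with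
  | case1 acc i hi hlt ih =>
    rw [combineLoop, if_pos hi, if_pos hlt, ih]
    have h1 : i + 1 < locations.length := by omega
    have hd : locations.drop i = locations[i] :: locations[i+1] :: locations.drop (i+2) := by
      rw [List.drop_eq_getElem_cons (by omega), List.drop_eq_getElem_cons (by omega)]
    have e1 : PySem.List.pyGetD locations (↑i) "" = locations[i] := by
      rw [PySem.List.pyGetD_natCast, List.getD_eq_getElem?_getD, List.getElem?_eq_getElem (by omega)]; rfl
    have e2 : PySem.List.pyGetD locations (↑i + 1) "" = locations[i+1] := by
      have hc : ((i : Int) + 1) = ((i + 1 : Nat) : Int) := by push_cast; ring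
      rw [hc, PySem.List.pyGetD_natCast, List.getD_eq_getElem?_getD, List.getElem?_eq_getElem h1]; rfl
    rw [hd, e1, e2]
    simp [pairUp]
  | case2 acc i hi hlt ih =>
    rw [combineLoop, if_pos hi, if_neg hlt, ih]
    have hd2 : locations.drop (i+1) = [] := by apply List.drop_eq_nil_of_le; omega
    have hd : locations.drop i = [locations[i]] := by
      rw [List.drop_eq_getElem_cons (by omega), hd2]
    have e1 : PySem.List.pyGetD locations (↑i) "" = locations[i] := by
      rw [PySem.List.pyGetD_natCast, List.getD_eq_getElem?_getD, List.getElem?_eq_getElem (by omega)]; rfl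
    rw [hd, hd2, e1]
    simp [pairUp]
  | case3 acc i hi =>
    rw [combineLoop, if_neg hi]
    have hd : locations.drop i = [] := by apply List.drop_eq_nil_of_le; omega
    rw [hd]
    simp [pairUp]

-- evens (a :: t) = a :: odds t
theorem slice2_cons (a : String) (t : List String) :
    PySem.List.slice? (a :: t) none none 2 =
      some (a :: (PySem.List.slice? t (some 1) none 2).getD []) := by
  simp only [PySem.List.slice?, PySem.List.sliceIndices]
  norm_num
  cases t with
  | nil => rfl
  | cons b t' =>
    have hmin : min (1:Int) ((b :: t').length : Int) = 1 := by
      simp only [List.length_cons]; omega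
    rw [hmin]
    have hcount : (((( (b :: t').length :Int) + 1 + 2 - 1) / 2).toNat)
        = (if 1 < (b :: t').length then ((((b :: t').length : Int) - 1 + 2 - 1) / 2).toNat else 0) + 1 := by
      simp only [List.length_cons]
      split_ifs <;> omega
    rw [hcount, List.range_succ_eq_map, List.filterMap_cons]
    norm_num
    congr 1
    funext x
    have hx : ((2:Int) * ((x:Int) + 1)).toNat = ((1:Int) + 2 * (x:Int)).toNat + 1 := by omega
    rw [hx, List.getElem?_cons_succ]

-- odds (a :: t) = evens t
theorem slice2_from1 (xs : List String) :
    PySem.List.slice? xs (some 1) none 2 = PySem.List.slice? xs.tail none none 2 := by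
  cases xs with
  | nil => rfl
  | cons h t =>
    simp only [PySem.List.slice?, PySem.List.sliceIndices, List.tail_cons]
    norm_num
    congr 1
    funext x
    have hx : ((1:Int) + 2 * (x:Int)).toNat = (2 * (x:Int)).toNat + 1 := by omega
    rw [hx, List.getElem?_cons_succ]

-- locations[-1] skips two leading elements while ≥ 1 remain behind them
theorem pyGetD_neg_one_cons_cons (x y : String) (r : List String) (hr : r ≠ []) :
    PySem.List.pyGetD (x::y::r) (-1) "" = PySem.List.pyGetD r (-1) "" := by
  have h1 : 0 < r.length := List.length_pos_iff.mpr hr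
  simp only [PySem.List.pyGetD, PySem.List.pyGet?, PySem.List.pyIdx?, List.length_cons]
  norm_num
  rw [if_pos (show 1 ≤ r.length by omega)]
  simp only [Option.bind_some, List.getElem?_eq_getElem (show r.length - 1 < r.length by omega), Option.getD_some]
  have h2 : (y :: r)[r.length] = (y :: r)[(r.length - 1) + 1]'(by simp; omega) := by
    congr 1; omega
  exact h2.trans (List.getElem_cons_succ ..)

-- B consumes two leading elements at a time
theorem alt_cons2 (x y : String) (r : List String) :
    combine_city_country_alt (x :: y :: r) = (x ++ ", " ++ y) :: combine_city_country_alt r := by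
  unfold combine_city_country_alt
  rw [slice2_cons, slice2_from1, slice2_from1]
  simp only [List.tail_cons]
  rw [slice2_cons]
  simp only [Option.getD_some, List.zip_cons_cons, List.map_cons]
  have hmod : PySem.Int.mod (((x :: y :: r).length : Int)) 2 = PySem.Int.mod ((r.length : Int)) 2 := by
    rw [PySem.Int.mod_eq_emod_of_pos (by norm_num), PySem.Int.mod_eq_emod_of_pos (by norm_num)]
    simp only [List.length_cons]
    push_cast
    omega
  rw [hmod]
  by_cases h : PySem.Int.mod ((r.length : Int)) 2 ≠ 0
  · have hr : r ≠ [] := by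
      intro hnil
      apply h
      rw [hnil]
      rfl
    rw [if_pos h, if_pos h, pyGetD_neg_one_cons_cons x y r hr]
    simp
  · rw [if_neg h, if_neg h]

theorem alt_eq_pairUp (xs : List String) : combine_city_country_alt xs = pairUp xs := by
  induction xs using pairUp.induct with
  | case1 => rfl
  | case2 x =>
    unfold combine_city_country_alt
    rw [slice2_cons, slice2_from1]
    simp [pairUp, PySem.Int.mod, PySem.List.pyGetD, PySem.List.pyGet?, PySem.List.pyIdx?, PySem.List.slice?, PySem.List.sliceIndices]
  | case3 x y r ih =>
    rw [alt_cons2, ih, pairUp]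

-- ===== VERDICT (by name: the statement is the Claim_ definition above) =====
theorem combine_city_country_spec : Claim_equal_combine_city_country := by
  intro locations _
  unfold Spec_combine_city_country combine_city_country
  rw [combineLoop_eq, alt_eq_pairUp]
  simp
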